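-- pv_equiv track=rewrite | github.com/Django0033/codewars | python/who-likes-it/who-likes-it.py | likes
-- ===== SOURCE A (Python) =====
-- def likes(names):
--     output = ''
--
--     if len(names) == 0:
--         output = 'no one likes this'
--
--     elif len(names) == 1:
--         output = names[0] + ' likes this'
--
--     elif len(names) > 1 and len(names) < 4:
--
--         for i in range(len(names) - 1):
--             output = output + names[i] + ', '
--
--         output = output[:-2]
--         output = output + ' and ' + names[-1] + ' like this'
--
--     else:
--
--         for i in range(0, 2):
--             output = output + names[i] + ', '
--
--         output = output[:-2]
--         output = output + ' and ' + str(len(names) - 2) + ' others like this'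
--
--     return output
-- ===== SOURCE B (Python) =====
-- def likes(names):
--     n = len(names)
--     # Normalize to a list of displayed items, then join generically.
--     if n == 0:
--         shown = ['no one']
--     elif n <= 3:
--         shown = names
--     else:
--         shown = names[:2] + [str(n - 2) + ' others']
--     if len(shown) == 1:
--         subject = shown[0]
--     else:
--         subject = ', '.join(shown[:-1]) + ' and ' + shown[-1]
--     verb = 'likes' if n <= 1 else 'like'
--     return subject + ' ' + verb + ' this'
-- ===== Notes on version B (the rewrite author's own statement) =====
-- stated objective: alternative
-- what changed: B normalizes the input to a 'shown' item list (empty -> ['no one'], 4+ -> first two plus an 'N others' item), then builds the sentence generically by joining the items with ', '/' and ' and appending a verb chosen by count, instead of A's per-branch accumulator loops and trailing-', ' slice trick.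
import Mathlib
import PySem

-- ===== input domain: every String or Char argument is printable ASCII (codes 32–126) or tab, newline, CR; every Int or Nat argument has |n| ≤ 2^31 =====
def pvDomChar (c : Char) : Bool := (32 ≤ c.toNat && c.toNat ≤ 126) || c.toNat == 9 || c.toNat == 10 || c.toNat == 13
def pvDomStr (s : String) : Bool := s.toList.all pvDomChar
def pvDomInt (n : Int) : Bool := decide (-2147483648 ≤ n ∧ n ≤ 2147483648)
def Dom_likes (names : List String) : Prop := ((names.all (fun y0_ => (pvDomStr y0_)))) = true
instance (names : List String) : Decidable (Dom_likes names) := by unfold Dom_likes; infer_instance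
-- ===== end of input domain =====

-- ===== PORT A =====
-- B normalizes to a 'shown' item list and joins it generically, instead of A's per-branch loops and slice trick (alternative decomposition; return-value equivalence).
def likes (names : List String) : String :=
  let nm := names.map String.toList
  if names.length == 0 then
    String.mk "no one likes this".toList
  else if names.length == 1 then
    String.mk (PySem.List.pyGetD nm (0 : Int) [] ++ " likes this".toList)
  else if 1 < names.length && names.length < 4 then
    let output := (PySem.List.pyRange 0 ((names.length : Int) - 1) 1).foldl
      (fun acc i => acc ++ PySem.List.pyGetD nm i [] ++ ", ".toList) []
    let output := PySem.List.slice output none (some (-2))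
    String.mk (output ++ " and ".toList ++ PySem.List.pyGetD nm (-1 : Int) [] ++ " like this".toList)
  else
    let output := (PySem.List.pyRange 0 2 1).foldl
      (fun acc i => acc ++ PySem.List.pyGetD nm i [] ++ ", ".toList) []
    let output := PySem.List.slice output none (some (-2))
    String.mk (output ++ " and ".toList ++ PySem.Int.toChars ((names.length : Int) - 2) ++ " others like this".toList)

-- ===== PORT B =====
def likes_alt (names : List String) : String :=
  let n := names.length
  let shown : List (List Char) :=
    if n == 0 then ["no one".toList]
    else if n ≤ 3 then names.map String.toList
    else (names.take 2).map String.toList ++ [PySem.Int.toChars ((n : Int) - 2) ++ " others".toList]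
  let subject :=
    if shown.length == 1 then shown.headD []
    else (List.intercalate ", ".toList shown.dropLast) ++ " and ".toList ++ (shown.getLast?.getD [])
  let verb := if n ≤ 1 then "likes".toList else "like".toList
  String.mk (subject ++ " ".toList ++ verb ++ " this".toList)

-- ===== PRECONDITION & SPEC =====
def Spec_likes (names : List String) (out : String) : Prop := out = likes_alt names
instance (names : List String) (out : String) : Decidable (Spec_likes names out) := by unfold Spec_likes; infer_instance

-- ===== CLAIM (what is proved, stated in full; the proofs are below) =====
def Claim_equal_likes : Prop := ∀ (names : List String), Dom_likes names → Spec_likes names (likes names)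

-- ===== LEMMAS AND PROOFS =====

-- slicing [:-2] off a list that ends in the two-char ", " suffix returns the prefix
theorem getD0 (x : List Char) (xs : List (List Char)) :
    PySem.List.pyGetD (x :: xs) (0 : Int) [] = x := by
  simp [PySem.List.pyGetD, PySem.List.pyGet?, PySem.List.pyIdx?]

theorem getD1 (x y : List Char) (xs : List (List Char)) :
    PySem.List.pyGetD (x :: y :: xs) (1 : Int) [] = y := by
  simp only [PySem.List.pyGetD, PySem.List.pyGet?, PySem.List.pyIdx?, List.length_cons]
  rw [if_pos (by omega), if_pos (by omega)]
  rfl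

theorem dropCommaSpace (l : List Char) :
    PySem.List.slice (l ++ ", ".toList) none (some (-2)) = l := by
  rw [PySem.List.slice_to_neg_ofNat _ 2 (by omega)]
  simp

-- ===== VERDICT (by name: the statement is the Claim_ definition above) =====
theorem likes_spec : Claim_equal_likes := by
  intro names _
  unfold Spec_likes likes likes_alt
  match names with
  | [] => rfl
  | [a] =>
    simp [PySem.List.pyGetD]
  | [a, b] =>
    norm_num
    rw [show PySem.List.pyRange 0 1 1 = [(0 : Int)] from by decide]
    simp only [List.map]
    simp only [PySem.List.pyGetD, PySem.List.pyGet?, PySem.List.pyIdx?]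
    norm_num
    rw [dropCommaSpace]
    simp [List.intercalate]
  | [a, b, c] =>
    norm_num
    rw [show PySem.List.pyRange 0 2 1 = [(0 : Int), 1] from by decide]
    simp only [List.map]
    simp only [PySem.List.pyGetD, PySem.List.pyGet?, PySem.List.pyIdx?]
    norm_num
    rw [show a.toList ++ (", ".toList ++ (b.toList ++ ", ".toList))
          = (a.toList ++ ", ".toList ++ b.toList) ++ ", ".toList by simp,
        dropCommaSpace]
    simp [List.intercalate]
  | a :: b :: c :: d :: t =>
    simp only [List.length_cons, List.map]
    rw [if_neg (by simp), if_neg (by simp), if_neg (by simp)]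
    rw [show PySem.List.pyRange 0 2 1 = [(0 : Int), 1] from by decide]
    simp only [List.foldl]
    rw [getD0, getD1]
    norm_num
    rw [show a.toList ++ (", ".toList ++ (b.toList ++ ", ".toList))
          = (a.toList ++ ", ".toList ++ b.toList) ++ ", ".toList by simp,
        dropCommaSpace,
        if_neg (show ¬ (t.length + 1 + 1 + 1 < 3) by omega)]
    simp [List.intercalate]
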